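-- pv_equiv track=rewrite | github.com/jeongwon-Yang/Rokey2 | weekly4/Uchan/2024_10_16.py | solution
-- ===== SOURCE A (Python) =====
-- def solution(price, money, count):
--
--     result = 0
--     for i in range(0,count):
--         result += price*(i+1)
--
--     if money < result:
--         total= result-money
--     else:
--          total = 0
--     answer = total
--
--     return answer
-- ===== SOURCE B (Python) =====
-- def solution(price, money, count):
--     total_cost = price * count * (count + 1) // 2 if count > 0 else 0
--     return max(total_cost - money, 0)
-- ===== Notes on version B (the rewrite author's own statement) =====
-- stated objective: faster
-- what changed: Replaced the O(count) accumulation loop with the closed-form arithmetic-series formula price*count*(count+1)//2 and a max() for the overflow amount.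
import Mathlib
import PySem

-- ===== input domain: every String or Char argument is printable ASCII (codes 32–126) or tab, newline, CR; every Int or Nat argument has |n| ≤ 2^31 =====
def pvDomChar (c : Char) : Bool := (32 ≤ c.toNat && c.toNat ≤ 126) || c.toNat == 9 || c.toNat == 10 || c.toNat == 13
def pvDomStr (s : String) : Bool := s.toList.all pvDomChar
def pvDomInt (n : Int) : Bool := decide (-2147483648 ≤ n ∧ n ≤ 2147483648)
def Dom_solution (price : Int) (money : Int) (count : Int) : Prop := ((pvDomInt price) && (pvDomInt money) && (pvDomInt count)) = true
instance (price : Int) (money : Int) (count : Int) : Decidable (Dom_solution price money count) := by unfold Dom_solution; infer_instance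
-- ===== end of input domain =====

-- B replaces A's O(count) accumulation loop with the closed-form arithmetic series
-- price*count*(count+1)//2 and max() for the overflow amount (objective: faster, O(1)).

-- ===== PORT A =====
def solution (price : Int) (money : Int) (count : Int) : Int :=
  let result := (PySem.List.pyRange 0 count 1).foldl (fun acc i => acc + price * (i + 1)) 0
  let total := if money < result then result - money else 0
  let answer := total
  answer

-- ===== PORT B =====
def solution_alt (price : Int) (money : Int) (count : Int) : Int :=
  let total_cost := if count > 0 then PySem.Int.floordiv (price * count * (count + 1)) 2 else 0
  max (total_cost - money) 0

-- ===== PRECONDITION & SPEC =====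
def Spec_solution (price : Int) (money : Int) (count : Int) (out : Int) : Prop := out = solution_alt price money count
instance (price : Int) (money : Int) (count : Int) (out : Int) : Decidable (Spec_solution price money count out) := by unfold Spec_solution; infer_instance

-- ===== CLAIM (what is proved, stated in full; the proofs are below) =====
def Claim_equal_solution : Prop := ∀ (price : Int) (money : Int) (count : Int), Dom_solution price money count → Spec_solution price money count (solution price money count)

-- ===== LEMMAS AND PROOFS =====

-- The loop's sum, doubled, is price*n*(n+1).
theorem pv_loop_sum (price : Int) (n : Nat) :
    2 * (PySem.List.pyRange 0 (n : Int) 1).foldl (fun acc i => acc + price * (i + 1)) 0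
      = price * n * (n + 1) := by
  induction n with
  | zero => simp [PySem.List.pyRange_one_eq_nil]
  | succ k ih =>
    have h : ((k : Int)) + 1 = ((k + 1 : Nat) : Int) := by push_cast; ring
    have hsplit := PySem.List.pyRange_one_succ_right (a := 0) (b := (k : Int)) (by positivity)
    rw [← h, hsplit, List.foldl_append]
    simp only [List.foldl_cons, List.foldl_nil]
    push_cast
    nlinarith [ih]
theorem pv_closed_form (price : Int) (count : Int) (hc : 0 < count) :
    (PySem.List.pyRange 0 count 1).foldl (fun acc i => acc + price * (i + 1)) 0
      = PySem.Int.floordiv (price * count * (count + 1)) 2 := by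
  obtain ⟨n, rfl⟩ : ∃ n : Nat, count = (n : Int) := ⟨count.toNat, (Int.toNat_of_nonneg hc.le).symm⟩
  have h := pv_loop_sum price n
  rw [PySem.Int.floordiv_eq_ediv_of_pos (by norm_num), ← h]
  omega

-- ===== VERDICT (by name: the statement is the Claim_ definition above) =====
theorem solution_spec : Claim_equal_solution := by
  intro price money count _
  unfold Spec_solution solution solution_alt
  by_cases hc : 0 < count
  · rw [pv_closed_form price count hc]
    simp only [hc, if_pos]
    omega
  · rw [PySem.List.pyRange_one_eq_nil (by omega)]
    simp only [List.foldl_nil, if_neg hc]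
    omega
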